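-- pv_equiv track=rewrite | github.com/Kris465/MemoryBox | block6/main42.py | find_digit_positions
-- ===== SOURCE A (Python) =====
-- def find_digit_positions(n):
--     digits = list(map(int, str(n)))  # Преобразуем число в список цифр
--     max1_index = max2_index = min1_index = min2_index = -1
--     max1 = max2 = float('-inf')
--     min1 = min2 = float('inf')
--
--     for i in range(len(digits)):
--         digit = digits[i]
--         # Проверка максимальных цифр
--         if digit > max1:
--             max2, max2_index = max1, max1_index
--             max1, max1_index = digit, i
--         elif digit > max2:
--             max2, max2_index = digit, i
--
--         # Проверка минимальных цифр
--         if digit < min1: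
--             min2, min2_index = min1, min1_index
--             min1, min1_index = digit, i
--         elif digit < min2:
--             min2, min2_index = digit, i
--
--     # Вычисляем порядковые номера от начала и конца
--     max1_position_from_start = max1_index + 1
--     max2_position_from_start = max2_index + 1
--     max1_position_from_end = len(digits) - max1_index
--     max2_position_from_end = len(digits) - max2_index
--
--     min1_position_from_start = min1_index + 1
--     min2_position_from_start = min2_index + 1
--     min1_position_from_end = len(digits) - min1_index
--     min2_position_from_end = len(digits) - min2_index
--
--     return {
--         "max_digits": {
--             "from_start": (max1_position_from_start, max2_position_from_start),
--             "from_end": (max1_position_from_end, max2_position_from_end)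
--         },
--         "min_digits": {
--             "from_start": (min1_position_from_start, min2_position_from_start),
--             "from_end": (min1_position_from_end, min2_position_from_end)
--         }
--     }
-- ===== SOURCE B (Python) =====
-- def find_digit_positions(n):
--     digits = [int(c) for c in str(n)]
--     L = len(digits)
--
--     def top_two(ds, extreme):
--         # first index of the extreme value, then the extreme of the rest
--         i1 = ds.index(extreme(ds))
--         rest = ds[:i1] + ds[i1 + 1:]
--         if not rest:
--             return i1, -1
--         r = rest.index(extreme(rest))
--         return i1, (r if r < i1 else r + 1)
--
--     mx1, mx2 = top_two(digits, max)
--     mn1, mn2 = top_two(digits, min)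
--     return {
--         "max_digits": {
--             "from_start": (mx1 + 1, mx2 + 1),
--             "from_end": (L - mx1, L - mx2)
--         },
--         "min_digits": {
--             "from_start": (mn1 + 1, mn2 + 1),
--             "from_end": (L - mn1, L - mn2)
--         }
--     }
-- ===== Notes on version B (the rewrite author's own statement) =====
-- stated objective: simpler
-- what changed: A streams once over the digits maintaining top-2 maxima and top-2 minima with float('inf') sentinels and interleaved branch cascades; B is two-phase selection: take the first index of max(digits) (resp. min), delete that occurrence, and take the first index of the extreme of the remainder, sharing one small top_two helper.
import Mathlib
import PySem

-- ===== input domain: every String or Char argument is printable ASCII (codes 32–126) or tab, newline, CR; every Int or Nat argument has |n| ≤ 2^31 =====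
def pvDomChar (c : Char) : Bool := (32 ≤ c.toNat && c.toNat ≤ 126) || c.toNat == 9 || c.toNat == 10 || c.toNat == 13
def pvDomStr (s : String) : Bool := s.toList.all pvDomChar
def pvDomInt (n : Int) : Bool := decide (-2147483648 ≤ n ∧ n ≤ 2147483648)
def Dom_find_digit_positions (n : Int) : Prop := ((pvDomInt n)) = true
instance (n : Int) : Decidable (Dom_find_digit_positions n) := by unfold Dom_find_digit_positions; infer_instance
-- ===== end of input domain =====

-- B replaces A's single streaming pass (top-2 maxima and top-2 minima tracked with float sentinels)
-- by two-phase selection: first index of the extreme, then the extreme of the list with that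
-- occurrence deleted; objective: simpler. Equality proved on Pre_ (A raises ValueError on negative n).

-- ===== PORT A =====
-- list(map(int, str(n))): shared first line of both Pythons. int(c) is ported as code-48, exact
-- because Pre_ excludes negative n, so str(n) consists of decimal digit characters only.
def pvDigits (n : Int) : List Int := (PySem.Int.toChars n).map (fun c => ((c.toNat : Int) - 48))

structure PvSt where
  max1i : Int
  max2i : Int
  min1i : Int
  min2i : Int
  max1 : Option Int
  max2 : Option Int
  min1 : Option Int
  min2 : Option Int
deriving DecidableEq, Repr

-- float('-inf') / float('inf') sentinels are ported as Option Int (none = the infinity); the only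
-- comparisons A makes are digit > max-slot and digit < min-slot, rendered exactly by these tests.
def pvGtNegInf (d : Int) (m : Option Int) : Bool :=
  match m with
  | none => true
  | some v => decide (v < d)

def pvLtPosInf (d : Int) (m : Option Int) : Bool :=
  match m with
  | none => true
  | some v => decide (d < v)

-- the two sequential if/elif blocks of A's loop body, in source order (they touch disjoint fields)
def pvStepMax (st : PvSt) (i d : Int) : PvSt :=
  if pvGtNegInf d st.max1 then
    { st with max2 := st.max1, max2i := st.max1i, max1 := some d, max1i := i }
  else if pvGtNegInf d st.max2 then
    { st with max2 := some d, max2i := i }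
  else st

def pvStepMin (st : PvSt) (i d : Int) : PvSt :=
  if pvLtPosInf d st.min1 then
    { st with min2 := st.min1, min2i := st.min1i, min1 := some d, min1i := i }
  else if pvLtPosInf d st.min2 then
    { st with min2 := some d, min2i := i }
  else st

def pvStep (st : PvSt) (i d : Int) : PvSt := pvStepMin (pvStepMax st i d) i d

def pvInit : PvSt := ⟨-1, -1, -1, -1, none, none, none, none⟩

def find_digit_positions (n : Int) : List (String × List (String × Int × Int)) :=
  let digits := pvDigits n
  let st := (PySem.List.pyRange 0 (PySem.List.len digits) 1).foldl
      (fun st i => pvStep st i (PySem.List.pyGetD digits i 0)) pvInit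
  let L : Int := PySem.List.len digits
  [("max_digits",
      [("from_start", (st.max1i + 1, st.max2i + 1)),
       ("from_end", (L - st.max1i, L - st.max2i))]),
   ("min_digits",
      [("from_start", (st.min1i + 1, st.min2i + 1)),
       ("from_end", (L - st.min1i, L - st.min2i))])]

-- ===== PORT B =====
def pvTopTwo (extreme : List Int → Option Int) (ds : List Int) : Int × Int :=
  let i1 : Nat := (PySem.List.index? ds ((extreme ds).getD 0)).getD 0
  let rest := PySem.List.slice ds none (some (i1 : Int)) ++ PySem.List.slice ds (some ((i1 : Int) + 1)) none
  if rest = [] then ((i1 : Int), -1)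
  else
    let r : Nat := (PySem.List.index? rest ((extreme rest).getD 0)).getD 0
    ((i1 : Int), if r < i1 then (r : Int) else (r : Int) + 1)

def find_digit_positions_alt (n : Int) : List (String × List (String × Int × Int)) :=
  let digits := pvDigits n
  let L : Int := PySem.List.len digits
  let mx := pvTopTwo (fun l => PySem.List.max? l (fun x => x)) digits
  let mn := pvTopTwo (fun l => PySem.List.min? l (fun x => x)) digits
  [("max_digits",
      [("from_start", (mx.1 + 1, mx.2 + 1)),
       ("from_end", (L - mx.1, L - mx.2))]),
   ("min_digits",
      [("from_start", (mn.1 + 1, mn.2 + 1)),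
       ("from_end", (L - mn.1, L - mn.2))])]

-- ===== PRECONDITION & SPEC =====
-- Pre_: exactly the inputs where Python A returns; on negative n, int('-') raises ValueError (so does B).
def Pre_find_digit_positions (n : Int) : Prop := 0 ≤ n
instance (n : Int) : Decidable (Pre_find_digit_positions n) := by unfold Pre_find_digit_positions; infer_instance
def pvWitness_find_digit_positions : Int := 507

def Spec_find_digit_positions (n : Int) (out : List (String × List (String × Int × Int))) : Prop := out = find_digit_positions_alt n
instance (n : Int) (out : List (String × List (String × Int × Int))) : Decidable (Spec_find_digit_positions n out) := by unfold Spec_find_digit_positions; infer_instance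

-- ===== CLAIM (what is proved, stated in full; the proofs are below) =====
def Claim_equal_find_digit_positions : Prop := ∀ (n : Int), Dom_find_digit_positions n → Pre_find_digit_positions n → Spec_find_digit_positions n (find_digit_positions n)

-- ===== LEMMAS AND PROOFS =====

-- (value, index) of the FIRST maximum / minimum of a list
def pvFMax : List Int → Option (Int × Nat)
  | [] => none
  | d :: ds =>
    match pvFMax ds with
    | none => some (d, 0)
    | some (v, j) => if d < v then some (v, j + 1) else some (d, 0)

def pvFMin : List Int → Option (Int × Nat)
  | [] => none
  | d :: ds =>
    match pvFMin ds with
    | none => some (d, 0)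
    | some (v, j) => if v < d then some (v, j + 1) else some (d, 0)

-- reference value of the four max-side (resp. min-side) state fields after A's whole loop
def pvRefMax (ds : List Int) : Option Int × Int × Option Int × Int :=
  match pvFMax ds with
  | none => (none, -1, none, -1)
  | some (v, j) =>
    match pvFMax (ds.eraseIdx j) with
    | none => (some v, (j : Int), none, -1)
    | some (v2, j2) => (some v, (j : Int), some v2, if j2 < j then (j2 : Int) else (j2 : Int) + 1)

def pvRefMin (ds : List Int) : Option Int × Int × Option Int × Int :=
  match pvFMin ds with
  | none => (none, -1, none, -1)
  | some (v, j) =>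
    match pvFMin (ds.eraseIdx j) with
    | none => (some v, (j : Int), none, -1)
    | some (v2, j2) => (some v, (j : Int), some v2, if j2 < j then (j2 : Int) else (j2 : Int) + 1)

theorem pvFMax_snoc (ds : List Int) (d : Int) :
    pvFMax (ds ++ [d]) =
      match pvFMax ds with
      | none => some (d, 0)
      | some (v, j) => if v < d then some (d, ds.length) else some (v, j) := by
  induction ds with
  | nil => simp [pvFMax]
  | cons a t ih =>
    simp only [List.cons_append, pvFMax, ih]
    cases h : pvFMax t with
    | none =>
      have : t = [] := by
        cases t with
        | nil => rfl
        | cons b u => simp only [pvFMax] at h; cases hb : pvFMax u <;> rw [hb] at h <;> simp at h <;> split at h <;> simp_all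
      subst this
      simp [pvFMax]
    | some p =>
      obtain ⟨v, j⟩ := p
      simp only [List.length_cons]
      split_ifs <;> simp_all <;> try omega
      all_goals (split_ifs <;> simp_all <;> omega)

theorem pvFMin_snoc (ds : List Int) (d : Int) :
    pvFMin (ds ++ [d]) =
      match pvFMin ds with
      | none => some (d, 0)
      | some (v, j) => if d < v then some (d, ds.length) else some (v, j) := by
  induction ds with
  | nil => simp [pvFMin]
  | cons a t ih =>
    simp only [List.cons_append, pvFMin, ih]
    cases h : pvFMin t with
    | none =>
      have : t = [] := by
        cases t with
        | nil => rfl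
        | cons b u => simp only [pvFMin] at h; cases hb : pvFMin u <;> rw [hb] at h <;> simp at h <;> split at h <;> simp_all
      subst this
      simp [pvFMin]
    | some p =>
      obtain ⟨v, j⟩ := p
      simp only [List.length_cons]
      split_ifs <;> simp_all <;> try omega
      all_goals (split_ifs <;> simp_all <;> omega)

theorem pvFMax_eq_none_iff (ds : List Int) : pvFMax ds = none ↔ ds = [] := by
  cases ds with
  | nil => simp [pvFMax]
  | cons a t => simp [pvFMax]; cases h : pvFMax t <;> simp [h] <;> split <;> simp

theorem pvFMin_eq_none_iff (ds : List Int) : pvFMin ds = none ↔ ds = [] := by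
  cases ds with
  | nil => simp [pvFMin]
  | cons a t => simp [pvFMin]; cases h : pvFMin t <;> simp [h] <;> split <;> simp

theorem pvFMax_char (ds : List Int) (v : Int) (j : Nat) (h : pvFMax ds = some (v, j)) :
    j < ds.length ∧ ds[j]? = some v ∧ (∀ y ∈ ds, y ≤ v) ∧ ∀ k, k < j → ds[k]? ≠ some v := by
  induction ds generalizing v j with
  | nil => simp [pvFMax] at h
  | cons a t ih =>
    simp only [pvFMax] at h
    cases ht : pvFMax t with
    | none =>
      rw [ht] at h
      simp at h
      obtain ⟨rfl, rfl⟩ := h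
      have : t = [] := (pvFMax_eq_none_iff t).mp ht
      subst this
      simp
    | some p =>
      obtain ⟨w, i⟩ := p
      rw [ht] at h
      obtain ⟨hi, hw, hmax, hfirst⟩ := ih w i ht
      dsimp only at h
      by_cases hcmp : a < w
      · rw [if_pos hcmp] at h
        simp at h
        obtain ⟨rfl, rfl⟩ := h
        refine ⟨by simpa using hi, by simpa using hw, ?_, ?_⟩
        · intro y hy
          rcases List.mem_cons.mp hy with rfl | hy
          · omega
          · exact hmax y hy
        · intro k hk
          cases k with
          | zero => simp; omega
          | succ k => simpa using hfirst k (by omega)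
      · rw [if_neg hcmp] at h
        simp at h
        obtain ⟨rfl, rfl⟩ := h
        refine ⟨by simp, by simp, ?_, by omega⟩
        intro y hy
        rcases List.mem_cons.mp hy with rfl | hy
        · exact le_refl _
        · exact le_trans (hmax y hy) (by omega)

theorem pvFMin_char (ds : List Int) (v : Int) (j : Nat) (h : pvFMin ds = some (v, j)) :
    j < ds.length ∧ ds[j]? = some v ∧ (∀ y ∈ ds, v ≤ y) ∧ ∀ k, k < j → ds[k]? ≠ some v := by
  induction ds generalizing v j with
  | nil => simp [pvFMin] at h
  | cons a t ih =>
    simp only [pvFMin] at h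
    cases ht : pvFMin t with
    | none =>
      rw [ht] at h
      simp at h
      obtain ⟨rfl, rfl⟩ := h
      have : t = [] := (pvFMin_eq_none_iff t).mp ht
      subst this
      simp
    | some p =>
      obtain ⟨w, i⟩ := p
      rw [ht] at h
      obtain ⟨hi, hw, hmax, hfirst⟩ := ih w i ht
      dsimp only at h
      by_cases hcmp : w < a
      · rw [if_pos hcmp] at h
        simp at h
        obtain ⟨rfl, rfl⟩ := h
        refine ⟨by simpa using hi, by simpa using hw, ?_, ?_⟩
        · intro y hy
          rcases List.mem_cons.mp hy with rfl | hy
          · omega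
          · exact hmax y hy
        · intro k hk
          cases k with
          | zero => simp; omega
          | succ k => simpa using hfirst k (by omega)
      · rw [if_neg hcmp] at h
        simp at h
        obtain ⟨rfl, rfl⟩ := h
        refine ⟨by simp, by simp, ?_, by omega⟩
        intro y hy
        rcases List.mem_cons.mp hy with rfl | hy
        · exact le_refl _
        · exact le_trans (by omega : a ≤ w) (hmax y hy)


theorem pvRefMax_snoc (ds : List Int) (d : Int) :
    pvRefMax (ds ++ [d]) =
      (if pvGtNegInf d (pvRefMax ds).1 then (some d, (ds.length : Int), (pvRefMax ds).1, (pvRefMax ds).2.1)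
       else if pvGtNegInf d (pvRefMax ds).2.2.1 then ((pvRefMax ds).1, (pvRefMax ds).2.1, some d, (ds.length : Int))
       else pvRefMax ds) := by
  cases h : pvFMax ds with
  | none =>
    have : ds = [] := (pvFMax_eq_none_iff ds).mp h
    subst this
    simp [pvRefMax, pvFMax, pvGtNegInf]
  | some p =>
    obtain ⟨v, j⟩ := p
    obtain ⟨hj, hvj, hmax, hfirst⟩ := pvFMax_char ds v j h
    have hsnoc := pvFMax_snoc ds d
    rw [h] at hsnoc
    dsimp only at hsnoc
    cases h2 : pvFMax (ds.eraseIdx j) with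
    | none =>
      have her : ds.eraseIdx j = [] := (pvFMax_eq_none_iff _).mp h2
      have hlen1 : ds.length = 1 := by
        have := List.length_eraseIdx_of_lt hj
        rw [her] at this
        simp at this
        omega
      have hj0 : j = 0 := by omega
      subst hj0
      have hR : pvRefMax ds = (some v, (0 : Int), none, -1) := by
        unfold pvRefMax; rw [h]; dsimp only; rw [h2]; try simp
      by_cases hvd : v < d
      · rw [if_pos hvd] at hsnoc
        have he : (ds ++ [d]).eraseIdx ds.length = ds := by
          rw [List.eraseIdx_eq_take_drop_succ]; simp
        have hL : pvRefMax (ds ++ [d]) = (some d, (ds.length : Int), some v, (0 : Int)) := by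
          unfold pvRefMax; rw [hsnoc]; dsimp only; rw [he, h]; dsimp only
          simp [hj]
        rw [hL, hR]
        simp [pvGtNegInf, hvd, hlen1]
      · rw [if_neg hvd] at hsnoc
        have he2 : (ds ++ [d]).eraseIdx 0 = ds.eraseIdx 0 ++ [d] := by
          rw [List.eraseIdx_eq_take_drop_succ, List.eraseIdx_eq_take_drop_succ]
          rw [List.take_append_of_le_length (by omega), List.drop_append_of_le_length (by omega)]
          simp
        have hL : pvRefMax (ds ++ [d]) = (some v, (0 : Int), some d, (1 : Int)) := by
          unfold pvRefMax; rw [hsnoc]; dsimp only; rw [he2, her]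
          simp [pvFMax]
        rw [hL, hR]
        simp [pvGtNegInf, hvd, hlen1]
    | some q =>
      obtain ⟨v2, j2⟩ := q
      obtain ⟨hj2, _, _, _⟩ := pvFMax_char _ v2 j2 h2
      have hlen : (ds.eraseIdx j).length = ds.length - 1 := List.length_eraseIdx_of_lt hj
      have hR : pvRefMax ds = (some v, (j : Int), some v2, if j2 < j then (j2 : Int) else (j2 : Int) + 1) := by
        unfold pvRefMax; rw [h]; dsimp only; rw [h2]; try simp
      by_cases hvd : v < d
      · rw [if_pos hvd] at hsnoc
        have he : (ds ++ [d]).eraseIdx ds.length = ds := by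
          rw [List.eraseIdx_eq_take_drop_succ]; simp
        have hL : pvRefMax (ds ++ [d]) = (some d, (ds.length : Int), some v, (j : Int)) := by
          unfold pvRefMax; rw [hsnoc]; dsimp only; rw [he, h]; dsimp only
          simp [hj]
        rw [hL, hR]
        simp [pvGtNegInf, hvd]
      · rw [if_neg hvd] at hsnoc
        have he2 : (ds ++ [d]).eraseIdx j = ds.eraseIdx j ++ [d] := by
          rw [List.eraseIdx_eq_take_drop_succ, List.eraseIdx_eq_take_drop_succ]
          rw [List.take_append_of_le_length (by omega), List.drop_append_of_le_length (by omega)]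
          simp
        have hsn2 := pvFMax_snoc (ds.eraseIdx j) d
        rw [h2] at hsn2
        dsimp only at hsn2
        by_cases hv2d : v2 < d
        · rw [if_pos hv2d] at hsn2
          have hL : pvRefMax (ds ++ [d]) = (some v, (j : Int), some d, (ds.length : Int)) := by
            unfold pvRefMax; rw [hsnoc]; dsimp only; rw [he2, hsn2]; dsimp only
            rw [hlen]
            rw [if_neg (by omega : ¬ (ds.length - 1 < j))]
            try rw [show ((ds.length - 1 : Nat) : Int) + 1 = (ds.length : Int) by omega]
          rw [hL, hR]
          simp [pvGtNegInf, hvd, hv2d]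
        · rw [if_neg hv2d] at hsn2
          have hL : pvRefMax (ds ++ [d]) = (some v, (j : Int), some v2, if j2 < j then (j2 : Int) else (j2 : Int) + 1) := by
            unfold pvRefMax; rw [hsnoc]; dsimp only; rw [he2, hsn2]
          rw [hL, hR]
          simp [pvGtNegInf, hvd, hv2d]

theorem pvRefMin_snoc (ds : List Int) (d : Int) :
    pvRefMin (ds ++ [d]) =
      (if pvLtPosInf d (pvRefMin ds).1 then (some d, (ds.length : Int), (pvRefMin ds).1, (pvRefMin ds).2.1)
       else if pvLtPosInf d (pvRefMin ds).2.2.1 then ((pvRefMin ds).1, (pvRefMin ds).2.1, some d, (ds.length : Int))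
       else pvRefMin ds) := by
  cases h : pvFMin ds with
  | none =>
    have : ds = [] := (pvFMin_eq_none_iff ds).mp h
    subst this
    simp [pvRefMin, pvFMin, pvLtPosInf]
  | some p =>
    obtain ⟨v, j⟩ := p
    obtain ⟨hj, hvj, hmin, hfirst⟩ := pvFMin_char ds v j h
    have hsnoc := pvFMin_snoc ds d
    rw [h] at hsnoc
    dsimp only at hsnoc
    cases h2 : pvFMin (ds.eraseIdx j) with
    | none =>
      have her : ds.eraseIdx j = [] := (pvFMin_eq_none_iff _).mp h2
      have hlen1 : ds.length = 1 := by
        have := List.length_eraseIdx_of_lt hj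
        rw [her] at this
        simp at this
        omega
      have hj0 : j = 0 := by omega
      subst hj0
      have hR : pvRefMin ds = (some v, (0 : Int), none, -1) := by
        unfold pvRefMin; rw [h]; dsimp only; rw [h2]; try simp
      by_cases hvd : d < v
      · rw [if_pos hvd] at hsnoc
        have he : (ds ++ [d]).eraseIdx ds.length = ds := by
          rw [List.eraseIdx_eq_take_drop_succ]; simp
        have hL : pvRefMin (ds ++ [d]) = (some d, (ds.length : Int), some v, (0 : Int)) := by
          unfold pvRefMin; rw [hsnoc]; dsimp only; rw [he, h]; dsimp only
          simp [hj]
        rw [hL, hR]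
        simp [pvLtPosInf, hvd, hlen1]
      · rw [if_neg hvd] at hsnoc
        have he2 : (ds ++ [d]).eraseIdx 0 = ds.eraseIdx 0 ++ [d] := by
          rw [List.eraseIdx_eq_take_drop_succ, List.eraseIdx_eq_take_drop_succ]
          rw [List.take_append_of_le_length (by omega), List.drop_append_of_le_length (by omega)]
          simp
        have hL : pvRefMin (ds ++ [d]) = (some v, (0 : Int), some d, (1 : Int)) := by
          unfold pvRefMin; rw [hsnoc]; dsimp only; rw [he2, her]
          simp [pvFMin]
        rw [hL, hR]
        simp [pvLtPosInf, hvd, hlen1]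
    | some q =>
      obtain ⟨v2, j2⟩ := q
      obtain ⟨hj2, _, _, _⟩ := pvFMin_char _ v2 j2 h2
      have hlen : (ds.eraseIdx j).length = ds.length - 1 := List.length_eraseIdx_of_lt hj
      have hR : pvRefMin ds = (some v, (j : Int), some v2, if j2 < j then (j2 : Int) else (j2 : Int) + 1) := by
        unfold pvRefMin; rw [h]; dsimp only; rw [h2]; try simp
      by_cases hvd : d < v
      · rw [if_pos hvd] at hsnoc
        have he : (ds ++ [d]).eraseIdx ds.length = ds := by
          rw [List.eraseIdx_eq_take_drop_succ]; simp
        have hL : pvRefMin (ds ++ [d]) = (some d, (ds.length : Int), some v, (j : Int)) := by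
          unfold pvRefMin; rw [hsnoc]; dsimp only; rw [he, h]; dsimp only
          simp [hj]
        rw [hL, hR]
        simp [pvLtPosInf, hvd]
      · rw [if_neg hvd] at hsnoc
        have he2 : (ds ++ [d]).eraseIdx j = ds.eraseIdx j ++ [d] := by
          rw [List.eraseIdx_eq_take_drop_succ, List.eraseIdx_eq_take_drop_succ]
          rw [List.take_append_of_le_length (by omega), List.drop_append_of_le_length (by omega)]
          simp
        have hsn2 := pvFMin_snoc (ds.eraseIdx j) d
        rw [h2] at hsn2
        dsimp only at hsn2
        by_cases hv2d : d < v2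
        · rw [if_pos hv2d] at hsn2
          have hL : pvRefMin (ds ++ [d]) = (some v, (j : Int), some d, (ds.length : Int)) := by
            unfold pvRefMin; rw [hsnoc]; dsimp only; rw [he2, hsn2]; dsimp only
            rw [hlen]
            rw [if_neg (by omega : ¬ (ds.length - 1 < j))]
            try rw [show ((ds.length - 1 : Nat) : Int) + 1 = (ds.length : Int) by omega]
          rw [hL, hR]
          simp [pvLtPosInf, hvd, hv2d]
        · rw [if_neg hv2d] at hsn2
          have hL : pvRefMin (ds ++ [d]) = (some v, (j : Int), some v2, if j2 < j then (j2 : Int) else (j2 : Int) + 1) := by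
            unfold pvRefMin; rw [hsnoc]; dsimp only; rw [he2, hsn2]
          rw [hL, hR]
          simp [pvLtPosInf, hvd, hv2d]

def pvMaxFields (st : PvSt) : Option Int × Int × Option Int × Int := (st.max1, st.max1i, st.max2, st.max2i)
def pvMinFields (st : PvSt) : Option Int × Int × Option Int × Int := (st.min1, st.min1i, st.min2, st.min2i)

theorem pvMaxFields_step (st : PvSt) (i d : Int) :
    pvMaxFields (pvStep st i d) =
      (if pvGtNegInf d (pvMaxFields st).1 then (some d, i, (pvMaxFields st).1, (pvMaxFields st).2.1)
       else if pvGtNegInf d (pvMaxFields st).2.2.1 then ((pvMaxFields st).1, (pvMaxFields st).2.1, some d, i)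
       else pvMaxFields st) := by
  unfold pvStep pvStepMin pvStepMax pvMaxFields
  split_ifs <;> rfl

theorem pvMinFields_step (st : PvSt) (i d : Int) :
    pvMinFields (pvStep st i d) =
      (if pvLtPosInf d (pvMinFields st).1 then (some d, i, (pvMinFields st).1, (pvMinFields st).2.1)
       else if pvLtPosInf d (pvMinFields st).2.2.1 then ((pvMinFields st).1, (pvMinFields st).2.1, some d, i)
       else pvMinFields st) := by
  unfold pvStep pvStepMin pvStepMax pvMinFields
  split_ifs <;> rfl

theorem pvFold_eq (ds : List Int) :
    pvMaxFields ((PySem.List.enumerate ds 0).foldl (fun st p => pvStep st p.1 p.2) pvInit) = pvRefMax ds ∧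
    pvMinFields ((PySem.List.enumerate ds 0).foldl (fun st p => pvStep st p.1 p.2) pvInit) = pvRefMin ds := by
  induction ds using List.reverseRecOn with
  | nil => constructor <;> rfl
  | append_singleton ds d ih =>
    obtain ⟨ihM, ihm⟩ := ih
    rw [PySem.List.enumerate_append]
    rw [show PySem.List.enumerate [d] (0 + (ds.length : Int)) = [((ds.length : Int), d)] by
      rw [PySem.List.enumerate_cons, PySem.List.enumerate_nil]; norm_num]
    rw [List.foldl_append]
    simp only [List.foldl_cons, List.foldl_nil]
    constructor
    · rw [pvMaxFields_step, ihM, pvRefMax_snoc]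
    · rw [pvMinFields_step, ihm, pvRefMin_snoc]

theorem pvIndex?_of_first (ds : List Int) (v : Int) (j : Nat) (hj : j < ds.length)
    (hv : ds[j]? = some v) (hf : ∀ k, k < j → ds[k]? ≠ some v) :
    PySem.List.index? ds v = some j := by
  rw [PySem.List.index?_eq_some_iff]
  have hvj : ds[j] = v := by
    have := List.getElem?_eq_getElem hj
    rw [this] at hv
    injection hv
  refine ⟨ds.take j, ds.drop (j + 1), ?_, by simp [Nat.min_eq_left hj.le], ?_⟩
  · conv_lhs => rw [← List.take_append_drop j ds]
    rw [List.drop_eq_getElem_cons hj, hvj]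
  · intro hmem
    obtain ⟨k, hk, hkv⟩ := List.mem_iff_getElem.mp hmem
    have hkj : k < j := by simpa using hk.trans_le (by simp)
    apply hf k hkj
    rw [List.getElem?_eq_getElem (by omega)]
    rw [← hkv, List.getElem_take]

theorem pvMax?_eq (ds : List Int) (v : Int) (j : Nat) (h : pvFMax ds = some (v, j)) :
    PySem.List.max? ds (fun x => x) = some v := by
  obtain ⟨hj, hv, hmax, _⟩ := pvFMax_char ds v j h
  have hne : ds ≠ [] := by intro e; subst e; simp at hj
  cases hm : PySem.List.max? ds (fun x => x) with
  | none => rw [PySem.List.max?_eq_none_iff] at hm; contradiction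
  | some m =>
    have hmem : m ∈ ds := PySem.List.max?_mem hm
    have hle := PySem.List.max?_isMax hm
    have hvm : v ∈ ds := List.mem_of_getElem? hv
    have h1 : m ≤ v := hmax m hmem
    have h2 : v ≤ m := hle v hvm
    rw [le_antisymm h1 h2]

theorem pvMin?_eq (ds : List Int) (v : Int) (j : Nat) (h : pvFMin ds = some (v, j)) :
    PySem.List.min? ds (fun x => x) = some v := by
  obtain ⟨hj, hv, hmin, _⟩ := pvFMin_char ds v j h
  have hne : ds ≠ [] := by intro e; subst e; simp at hj
  cases hm : PySem.List.min? ds (fun x => x) with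
  | none => rw [PySem.List.min?_eq_none_iff] at hm; contradiction
  | some m =>
    have hmem : m ∈ ds := PySem.List.min?_mem hm
    have hle := PySem.List.min?_isMin hm
    have hvm : v ∈ ds := List.mem_of_getElem? hv
    have h1 : v ≤ m := hmin m hmem
    have h2 : m ≤ v := hle v hvm
    rw [le_antisymm h2 h1]

theorem pvRest_eq (ds : List Int) (j : Nat) :
    PySem.List.slice ds none (some (j : Int)) ++ PySem.List.slice ds (some ((j : Int) + 1)) none = ds.eraseIdx j := by
  rw [PySem.List.slice_to_natCast]
  rw [show ((j : Int) + 1) = ((j + 1 : Nat) : Int) by push_cast; ring]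
  rw [PySem.List.slice_from_natCast]
  rw [List.eraseIdx_eq_take_drop_succ]

theorem pvTopTwo_max (ds : List Int) (hne : ds ≠ []) :
    pvTopTwo (fun l => PySem.List.max? l (fun x => x)) ds = ((pvRefMax ds).2.1, (pvRefMax ds).2.2.2) := by
  cases h : pvFMax ds with
  | none => exact absurd ((pvFMax_eq_none_iff ds).mp h) hne
  | some p =>
    obtain ⟨v, j⟩ := p
    obtain ⟨hj, hv, hmax, hfirst⟩ := pvFMax_char ds v j h
    have hm := pvMax?_eq ds v j h
    have hi := pvIndex?_of_first ds v j hj hv hfirst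
    unfold pvTopTwo
    simp only [hm, Option.getD_some, hi, pvRest_eq]
    cases h2 : pvFMax (ds.eraseIdx j) with
    | none =>
      have her : ds.eraseIdx j = [] := (pvFMax_eq_none_iff _).mp h2
      rw [if_pos her]
      unfold pvRefMax
      rw [h]; dsimp only; rw [h2]
    | some q =>
      obtain ⟨v2, j2⟩ := q
      obtain ⟨hj2, hv2, hmax2, hfirst2⟩ := pvFMax_char _ v2 j2 h2
      have hner : ds.eraseIdx j ≠ [] := by intro e; rw [e] at hj2; simp at hj2
      rw [if_neg hner]
      have hm2 := pvMax?_eq _ v2 j2 h2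
      have hi2 := pvIndex?_of_first _ v2 j2 hj2 hv2 hfirst2
      simp only [hm2, Option.getD_some, hi2]
      unfold pvRefMax
      rw [h]; dsimp only; rw [h2]

theorem pvTopTwo_min (ds : List Int) (hne : ds ≠ []) :
    pvTopTwo (fun l => PySem.List.min? l (fun x => x)) ds = ((pvRefMin ds).2.1, (pvRefMin ds).2.2.2) := by
  cases h : pvFMin ds with
  | none => exact absurd ((pvFMin_eq_none_iff ds).mp h) hne
  | some p =>
    obtain ⟨v, j⟩ := p
    obtain ⟨hj, hv, hmin, hfirst⟩ := pvFMin_char ds v j h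
    have hm := pvMin?_eq ds v j h
    have hi := pvIndex?_of_first ds v j hj hv hfirst
    unfold pvTopTwo
    simp only [hm, Option.getD_some, hi, pvRest_eq]
    cases h2 : pvFMin (ds.eraseIdx j) with
    | none =>
      have her : ds.eraseIdx j = [] := (pvFMin_eq_none_iff _).mp h2
      rw [if_pos her]
      unfold pvRefMin
      rw [h]; dsimp only; rw [h2]
    | some q =>
      obtain ⟨v2, j2⟩ := q
      obtain ⟨hj2, hv2, hmin2, hfirst2⟩ := pvFMin_char _ v2 j2 h2
      have hner : ds.eraseIdx j ≠ [] := by intro e; rw [e] at hj2; simp at hj2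
      rw [if_neg hner]
      have hm2 := pvMin?_eq _ v2 j2 h2
      have hi2 := pvIndex?_of_first _ v2 j2 hj2 hv2 hfirst2
      simp only [hm2, Option.getD_some, hi2]
      unfold pvRefMin
      rw [h]; dsimp only; rw [h2]

theorem pvToDigitsCore_le (b : Nat) (fuel : Nat) :
    ∀ (n : Nat) (l : List Char), l.length ≤ (Nat.toDigitsCore b fuel n l).length := by
  induction fuel with
  | zero => intro n l; simp [Nat.toDigitsCore]
  | succ f ih =>
    intro n l
    rw [Nat.toDigitsCore]
    split
    · simp
    · exact le_trans (by simp) (ih _ _)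

theorem pvDigits_ne_nil (n : Int) : pvDigits n ≠ [] := by
  unfold pvDigits
  rw [Ne, List.map_eq_nil_iff]
  unfold PySem.Int.toChars
  split
  · simp
  · intro hnil
    have h1 : (1 : Nat) ≤ (Nat.toDigits 10 n.toNat).length := by
      rw [Nat.toDigits, Nat.toDigitsCore]
      split
      · simp
      · exact le_trans (by simp) (pvToDigitsCore_le 10 _ _ _)
    rw [hnil] at h1
    simp at h1

-- ===== VERDICT (by name: the statement is the Claim_ definition above) =====
theorem find_digit_positions_spec : Claim_equal_find_digit_positions := by
  intro n _ _
  unfold Spec_find_digit_positions find_digit_positions find_digit_positions_alt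
  have hne := pvDigits_ne_nil n
  have hfold :
      (PySem.List.pyRange 0 (PySem.List.len (pvDigits n)) 1).foldl
        (fun st i => pvStep st i (PySem.List.pyGetD (pvDigits n) i 0)) pvInit
      = (PySem.List.enumerate (pvDigits n) 0).foldl (fun st p => pvStep st p.1 p.2) pvInit := by
    rw [PySem.List.enumerate_eq_map_pyRange (d := 0), List.foldl_map]
  obtain ⟨hM, hm⟩ := pvFold_eq (pvDigits n)
  have e1 : ((PySem.List.enumerate (pvDigits n) 0).foldl (fun st p => pvStep st p.1 p.2) pvInit).max1i = (pvRefMax (pvDigits n)).2.1 := by rw [← hM]; rfl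
  have e2 : ((PySem.List.enumerate (pvDigits n) 0).foldl (fun st p => pvStep st p.1 p.2) pvInit).max2i = (pvRefMax (pvDigits n)).2.2.2 := by rw [← hM]; rfl
  have e3 : ((PySem.List.enumerate (pvDigits n) 0).foldl (fun st p => pvStep st p.1 p.2) pvInit).min1i = (pvRefMin (pvDigits n)).2.1 := by rw [← hm]; rfl
  have e4 : ((PySem.List.enumerate (pvDigits n) 0).foldl (fun st p => pvStep st p.1 p.2) pvInit).min2i = (pvRefMin (pvDigits n)).2.2.2 := by rw [← hm]; rfl
  dsimp only
  rw [hfold, e1, e2, e3, e4, pvTopTwo_max _ hne, pvTopTwo_min _ hne]
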